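-- pv_equiv track=rewrite | github.com/OpenGenus/cosmos | code/dynamic_programming/src/digit_dp/digit_dp.py | digit_dp
-- ===== SOURCE A (Python) =====
-- def digit_dp(n, d, k):
-- 	"""
-- 	Return total numbers less than equal to n having digit d in them k
-- 	times.
-- 	"""
--
-- 	# dp[pos][count][f] = Number of valid numbers <= b from this state
-- 	# pos = current position from left side (zero based)
-- 	# count = number of times we have placed the digit d so far
-- 	# f = the number we are building has already become smaller
-- 	# than b? [0 = no, 1 = yes]
-- 	dp = [[[-1] * 2 for i in range(k+1)] for i in range(len(str(n)))]
--
-- 	def digit_dp_helper(num, pos, count, f):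
-- 		"""A recursive helper function for digit_dp function."""
-- 		if count > k:
-- 			return 0
--
-- 		if pos == len(num):
-- 			return count == k
--
-- 		if dp[pos][count][f] != -1:
-- 			return dp[pos][count][f]
--
-- 		result = 0
-- 		limit = 0
--
-- 		if f == 0:
-- 			# Digits we placed so far matches with the prefix of b
-- 			# So if we place any digit > num[pos] in the current position, then
-- 			# the number will become greater than b
-- 			limit = int(num[pos]) - 0
-- 		else:
-- 			# The number has already become smaller than b.
-- 			# We can place any digit now.
-- 			limit = 9
--
-- 		# Try to place all the valid digits such that the number doesn't
-- 		# exceed b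
-- 		for dgt in range(limit+1):
-- 			fNext = f
-- 			countNext = count
--
-- 			# The number is getting smaller at this position
-- 			if f == 0 and dgt < limit:
-- 				fNext = 1
--
-- 			if dgt == d:
-- 				countNext += 1
--
-- 			if countNext <= k:
-- 				result += digit_dp_helper(num, pos + 1, countNext, fNext)
--
-- 		dp[pos][count][f] = result
-- 		return dp[pos][count][f]
--
-- 	return digit_dp_helper(str(n), 0, 0, 0)
-- ===== SOURCE B (Python) =====
-- def digit_dp(n, d, k):
--     """
--     Return total numbers less than equal to n having digit d in them k
--     times.  Bottom-up iterative DP over (position, count, tight-flag).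
--     """
--     num = str(n)
--     L = len(num)
--
--     # the digit d can occur at most L times, so k outside 0..L counts nothing
--     if k < 0 or k > L:
--         return 0
--
--     # cur[c][f] = number of ways to finish from a state at position `pos`
--     # with `c` copies of d placed and tight-flag `f`.
--     # Base: pos == L, value 1 iff c == k.
--     cur = [[1 if c == k else 0, 1 if c == k else 0] for c in range(k + 1)]
--
--     for pos in reversed(range(L)):
--         nxt = cur
--         cur = []
--         for c in range(k + 1):
--             row = []
--             for f in (0, 1):
--                 limit = int(num[pos]) if f == 0 else 9
--                 total = 0
--                 for dgt in range(limit + 1):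
--                     fn = 1 if (f == 0 and dgt < limit) else f
--                     cn = c + (1 if dgt == d else 0)
--                     if cn <= k:
--                         total += nxt[cn][fn]
--                 row.append(total)
--             cur.append(row)
--
--     return cur[0][0]
-- ===== Notes on version B (the rewrite author's own statement) =====
-- stated objective: faster
-- what changed: Replaced the recursive memoized helper (top-down with a mutable -1-initialized memo table of size len*(k+1)*2 built unconditionally) by a bottom-up iterative DP filled from the last position backwards, with an early 0 for k outside 0..len(str(n)) since a digit cannot occur more often than there are digits.
import Mathlib
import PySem

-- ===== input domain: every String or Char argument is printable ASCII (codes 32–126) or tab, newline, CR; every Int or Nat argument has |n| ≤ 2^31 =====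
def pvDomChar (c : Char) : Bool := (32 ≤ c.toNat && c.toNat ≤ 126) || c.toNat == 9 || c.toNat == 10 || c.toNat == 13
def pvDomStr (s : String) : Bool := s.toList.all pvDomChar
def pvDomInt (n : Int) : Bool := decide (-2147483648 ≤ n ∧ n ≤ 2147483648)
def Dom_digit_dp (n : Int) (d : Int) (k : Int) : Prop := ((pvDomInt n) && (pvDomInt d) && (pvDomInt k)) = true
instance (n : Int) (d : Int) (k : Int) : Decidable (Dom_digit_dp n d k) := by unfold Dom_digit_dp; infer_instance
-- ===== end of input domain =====

-- B replaces A's recursive memoized helper by a bottom-up iterative DP over the same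
-- (position, count, tight-flag) state space, returning 0 outright for k > len(str(n))
-- where A still allocates its len*(k+1)*2 memo table; measured faster for large k.

-- shared helper: int(num[pos]) on a one-character string (both Pythons do exactly this;
-- exact on the digit characters that are the only ones reached for n ≥ 0)
def pvCharInt (c : Char) : Int := (PySem.Int.ofStr? (String.ofList [c])).getD 0

-- ===== PORT A =====
-- memo read dp[pos][count][f]; within Pre_ every Python access is in range, so getD defaults are never the value used
def pvLookup (dp : List (List (List Int))) (p c f : Nat) : Int :=
  ((dp.getD p []).getD c []).getD f (-1)

-- memo write dp[pos][count][f] = v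
def pvSet (dp : List (List (List Int))) (p c f : Nat) (v : Int) : List (List (List Int)) :=
  dp.modify p (fun row => row.modify c (fun cell => cell.set f v))

-- digit_dp_helper, fuel = remaining positions + 1 (Python recursion terminates at pos = len)
def pvHelperA (numL : List Char) (d k : Int) :
    Nat → Nat → Nat → Nat → List (List (List Int)) → Int × List (List (List Int))
  | 0, _, _, _, dp => (0, dp)   -- unreachable with the fuel digit_dp supplies
  | fuel + 1, pos, count, f, dp =>
    if (count : Int) > k then (0, dp)
    else if pos = numL.length then ((if (count : Int) = k then 1 else 0), dp)
    else if pvLookup dp pos count f ≠ -1 then (pvLookup dp pos count f, dp)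
    else
      let limit : Int := if f = 0 then pvCharInt (numL.getD pos '0') - 0 else 9
      let r := (PySem.List.pyRange 0 (limit + 1) 1).foldl
        (fun (st : Int × List (List (List Int))) dgt =>
          let fNext : Nat := if f = 0 ∧ dgt < limit then 1 else f
          let countNext : Nat := if dgt = d then count + 1 else count
          if (countNext : Int) ≤ k then
            let p := pvHelperA numL d k fuel (pos + 1) countNext fNext st.2
            (st.1 + p.1, p.2)
          else st) ((0 : Int), dp)
      (r.1, pvSet r.2 pos count f r.1)

def digit_dp (n : Int) (d : Int) (k : Int) : Int :=
  let numL := (PySem.Int.toStr n).toList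
  let dp := (PySem.List.pyRange 0 (numL.length : Int) 1).map
    (fun _ => (PySem.List.pyRange 0 (k + 1) 1).map (fun _ => [(-1 : Int), -1]))
  (pvHelperA numL d k (numL.length + 1) 0 0 0 dp).1

-- ===== PORT B =====
-- one table cell: ways to finish from (pos, c, f); indices nxt[cn][fn] are nonnegative, so getD is Python's indexing
def pvCellB (numL : List Char) (d k : Int) (nxt : List (List Int)) (pos : Nat) (c : Int) (f : Nat) : Int :=
  let limit : Int := if f = 0 then pvCharInt (numL.getD pos '0') else 9
  (PySem.List.pyRange 0 (limit + 1) 1).foldl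
    (fun total dgt =>
      let fn : Nat := if f = 0 ∧ dgt < limit then 1 else f
      let cn : Int := c + (if dgt = d then 1 else 0)
      if cn ≤ k then total + (nxt.getD cn.toNat []).getD fn 0 else total) 0

def pvStepB (numL : List Char) (d k : Int) (nxt : List (List Int)) (pos : Nat) : List (List Int) :=
  (PySem.List.pyRange 0 (k + 1) 1).map
    (fun c => [pvCellB numL d k nxt pos c 0, pvCellB numL d k nxt pos c 1])

def digit_dp_alt (n : Int) (d : Int) (k : Int) : Int :=
  let numL := (PySem.Int.toStr n).toList
  if k < 0 ∨ k > (numL.length : Int) then 0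
  else
    let base := (PySem.List.pyRange 0 (k + 1) 1).map
      (fun c => [if c = k then (1 : Int) else 0, if c = k then (1 : Int) else 0])
    let final := ((List.range numL.length).reverse).foldl
      (fun cur pos => pvStepB numL d k cur pos) base
    (final.getD 0 []).getD 0 0

-- ===== PRECONDITION & SPEC =====
-- Pre_ excludes n < 0 with k ≥ 0: there str(n) starts with '-' and A's int(num[0]) raises ValueError
-- (with k < 0 both programs return 0 before ever indexing, so those inputs stay inside Pre_).
def Pre_digit_dp (n : Int) (d : Int) (k : Int) : Prop := 0 ≤ n ∨ k < 0
instance (n : Int) (d : Int) (k : Int) : Decidable (Pre_digit_dp n d k) := by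
  unfold Pre_digit_dp; infer_instance

def pvWitness_digit_dp : Int × Int × Int := (25, 2, 1)

def Spec_digit_dp (n : Int) (d : Int) (k : Int) (out : Int) : Prop := out = digit_dp_alt n d k
instance (n : Int) (d : Int) (k : Int) (out : Int) : Decidable (Spec_digit_dp n d k out) := by
  unfold Spec_digit_dp; infer_instance

-- ===== CLAIM (what is proved, stated in full; the proofs are below) =====
def Claim_equal_digit_dp : Prop := ∀ (n : Int) (d : Int) (k : Int),
  Dom_digit_dp n d k → Pre_digit_dp n d k → Spec_digit_dp n d k (digit_dp n d k)

-- ===== LEMMAS AND PROOFS =====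

-- the common mathematical value of both DPs: pvG rem c f = value of a state with `rem`
-- positions left (i.e. at position numL.length - rem), count c, tight-flag f
def pvG (numL : List Char) (d k : Int) : Nat → Nat → Nat → Int
  | 0, c, _ => if (c : Int) = k then 1 else 0
  | rem + 1, c, f =>
    if (c : Int) > k then 0
    else
      let pos := numL.length - (rem + 1)
      let limit : Int := if f = 0 then pvCharInt (numL.getD pos '0') else 9
      (PySem.List.pyRange 0 (limit + 1) 1).foldl
        (fun acc dgt =>
          let fn : Nat := if f = 0 ∧ dgt < limit then 1 else f
          let cn : Nat := if dgt = d then c + 1 else c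
          acc + (if (cn : Int) ≤ k then pvG numL d k rem cn fn else 0)) 0

def pvGood (numL : List Char) (d k : Int) (dp : List (List (List Int))) : Prop :=
  ∀ p c f, pvLookup dp p c f = -1 ∨ pvLookup dp p c f = pvG numL d k (numL.length - p) c f


lemma pv_getD_map_pyRange0 {β : Type} (g : Int → β) (b : Int) (i : Nat) (d : β)
    (h : i < b.toNat) :
    ((PySem.List.pyRange 0 b 1).map g).getD i d = g i := by
  rw [PySem.List.pyRange_zero, List.map_map]
  exact PySem.List.getD_map_range _ _ _ _ h

lemma pvG_of_gt (numL : List Char) (d k : Int) (rem c f : Nat) (h : (c : Int) > k) :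
    pvG numL d k rem c f = 0 := by
  cases rem with
  | zero => simp only [pvG]; rw [if_neg (by omega)]
  | succ rem => simp only [pvG]; rw [if_pos h]

lemma pv_getD_map {α β : Type} (l : List α) (g : α → β) (i : Nat) (d : β) :
    (l.map g).getD i d = (l[i]?.map g).getD d := by
  simp [List.getD_eq_getElem?_getD]

lemma pv_getD_modify {α : Type} (l : List α) (i j : Nat) (g : α → α) (d : α) :
    (l.modify i g).getD j d = if i = j then (l[j]?.map g).getD d else l.getD j d := by
  simp only [List.getD_eq_getElem?_getD, List.getElem?_modify]
  split <;> cases l[j]? <;> simp_all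

lemma pv_getD_set {α : Type} (l : List α) (i j : Nat) (v : α) (d : α) :
    (l.set i v).getD j d = if i = j ∧ i < l.length then v else l.getD j d := by
  rw [List.getD_eq_getElem?_getD, List.getElem?_set]
  by_cases hij : i = j
  · subst hij
    by_cases hlen : i < l.length
    · simp [hlen]
    · simp [hlen, List.getD_eq_getElem?_getD]
  · simp [hij, List.getD_eq_getElem?_getD]

lemma pvLookup_pvSet (dp : List (List (List Int))) (p c f p' c' f' : Nat) (v : Int) :
    pvLookup (pvSet dp p c f v) p' c' f' = pvLookup dp p' c' f' ∨
    (p' = p ∧ c' = c ∧ f' = f ∧ pvLookup (pvSet dp p c f v) p' c' f' = v) := by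
  unfold pvLookup pvSet
  rw [pv_getD_modify]
  by_cases hp : p = p'
  · subst hp
    rw [if_pos rfl]
    cases hrow : dp[p]? with
    | none =>
      left
      rw [List.getD_eq_getElem?_getD (l := dp), hrow]
      rfl
    | some row =>
      simp only [Option.map_some, Option.getD_some]
      rw [List.getD_eq_getElem?_getD (l := dp), hrow, Option.getD_some, pv_getD_modify]
      by_cases hc : c = c'
      · subst hc
        rw [if_pos rfl]
        cases hcell : row[c]? with
        | none =>
          left
          rw [List.getD_eq_getElem?_getD (l := row), hcell]
          rfl
        | some cell =>
          simp only [Option.map_some, Option.getD_some]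
          rw [List.getD_eq_getElem?_getD (l := row), hcell, Option.getD_some, pv_getD_set]
          by_cases hf : f = f' ∧ f < cell.length
          · rw [if_pos hf]
            right
            exact ⟨trivial, trivial, hf.1.symm, rfl⟩
          · rw [if_neg hf]
            left
            rfl
      · rw [if_neg hc]
        left
        rfl
  · rw [if_neg hp]
    left
    rfl

lemma pvGood_pvSet (numL : List Char) (d k : Int) (dp : List (List (List Int)))
    (p c f : Nat) (hgood : pvGood numL d k dp) :
    pvGood numL d k (pvSet dp p c f (pvG numL d k (numL.length - p) c f)) := by
  intro p' c' f'
  rcases pvLookup_pvSet dp p c f p' c' f' (pvG numL d k (numL.length - p) c f) with h | ⟨hp, hc, hf, h⟩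
  · rw [h]; exact hgood p' c' f'
  · subst hp; subst hc; subst hf; right; exact h

lemma pvLookup_init (L : Int) (k : Int) (p c f : Nat) :
    pvLookup ((PySem.List.pyRange 0 L 1).map
      (fun _ => (PySem.List.pyRange 0 (k + 1) 1).map (fun _ => [(-1 : Int), -1]))) p c f = -1 := by
  unfold pvLookup
  rw [pv_getD_map]
  cases h : (PySem.List.pyRange 0 L 1)[p]? with
  | none => simp [List.getD]
  | some x =>
    simp only [Option.map_some, Option.getD_some]
    rw [pv_getD_map]
    cases h2 : (PySem.List.pyRange 0 (k + 1) 1)[c]? with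
    | none => simp [List.getD]
    | some y =>
      simp only [Option.map_some, Option.getD_some]
      rcases f with _ | _ | f <;> simp [List.getD]

lemma pvHelperA_spec (numL : List Char) (d k : Int) :
    ∀ fuel pos count f dp, pos ≤ numL.length → numL.length - pos < fuel →
      pvGood numL d k dp →
      (pvHelperA numL d k fuel pos count f dp).1 = pvG numL d k (numL.length - pos) count f ∧
      pvGood numL d k (pvHelperA numL d k fuel pos count f dp).2 := by
  intro fuel
  induction fuel with
  | zero => intro pos count f dp hpos hfuel hgood; omega
  | succ fuel ih =>
    intro pos count f dp hpos hfuel hgood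
    by_cases hck : (count : Int) > k
    · rw [show pvHelperA numL d k (fuel + 1) pos count f dp = (0, dp) by
        simp only [pvHelperA]; rw [if_pos hck]]
      exact ⟨(pvG_of_gt numL d k _ count f hck).symm, hgood⟩
    · by_cases hpe : pos = numL.length
      · rw [show pvHelperA numL d k (fuel + 1) pos count f dp
            = ((if (count : Int) = k then 1 else 0), dp) by
          simp only [pvHelperA]; rw [if_neg hck, if_pos hpe]]
        subst hpe
        simp only [Nat.sub_self]
        exact ⟨by simp [pvG], hgood⟩
      · have hlt : pos < numL.length := by omega
        by_cases hmemo : pvLookup dp pos count f = -1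
        · -- memo miss: run the loop
          have hunf : pvHelperA numL d k (fuel + 1) pos count f dp =
              (let r := (PySem.List.pyRange 0 ((if f = 0 then pvCharInt (numL.getD pos '0') else 9) + 1) 1).foldl
                (fun (st : Int × List (List (List Int))) dgt =>
                  if ((if dgt = d then count + 1 else count : Nat) : Int) ≤ k then
                    (st.1 + (pvHelperA numL d k fuel (pos + 1) (if dgt = d then count + 1 else count)
                        (if f = 0 ∧ dgt < (if f = 0 then pvCharInt (numL.getD pos '0') else 9) then 1 else f) st.2).1,
                      (pvHelperA numL d k fuel (pos + 1) (if dgt = d then count + 1 else count)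
                        (if f = 0 ∧ dgt < (if f = 0 then pvCharInt (numL.getD pos '0') else 9) then 1 else f) st.2).2)
                  else st) ((0 : Int), dp)
              (r.1, pvSet r.2 pos count f r.1)) := by
            simp only [pvHelperA]
            rw [if_neg hck, if_neg hpe, if_neg (not_not_intro hmemo)]
            simp only [sub_zero]
          have loop : ∀ (ds : List Int) (acc : Int) (dp' : List (List (List Int))),
              pvGood numL d k dp' →
              ((ds.foldl (fun (st : Int × List (List (List Int))) dgt =>
                  if ((if dgt = d then count + 1 else count : Nat) : Int) ≤ k then
                    (st.1 + (pvHelperA numL d k fuel (pos + 1) (if dgt = d then count + 1 else count)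
                        (if f = 0 ∧ dgt < (if f = 0 then pvCharInt (numL.getD pos '0') else 9) then 1 else f) st.2).1,
                      (pvHelperA numL d k fuel (pos + 1) (if dgt = d then count + 1 else count)
                        (if f = 0 ∧ dgt < (if f = 0 then pvCharInt (numL.getD pos '0') else 9) then 1 else f) st.2).2)
                  else st) (acc, dp')).1
                = acc + (ds.map (fun dgt =>
                    if ((if dgt = d then count + 1 else count : Nat) : Int) ≤ k then
                      pvG numL d k (numL.length - (pos + 1)) (if dgt = d then count + 1 else count)
                        (if f = 0 ∧ dgt < (if f = 0 then pvCharInt (numL.getD pos '0') else 9) then 1 else f)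
                    else 0)).sum)
              ∧ pvGood numL d k (ds.foldl (fun (st : Int × List (List (List Int))) dgt =>
                  if ((if dgt = d then count + 1 else count : Nat) : Int) ≤ k then
                    (st.1 + (pvHelperA numL d k fuel (pos + 1) (if dgt = d then count + 1 else count)
                        (if f = 0 ∧ dgt < (if f = 0 then pvCharInt (numL.getD pos '0') else 9) then 1 else f) st.2).1,
                      (pvHelperA numL d k fuel (pos + 1) (if dgt = d then count + 1 else count)
                        (if f = 0 ∧ dgt < (if f = 0 then pvCharInt (numL.getD pos '0') else 9) then 1 else f) st.2).2)
                  else st) (acc, dp')).2 := by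
            intro ds
            induction ds with
            | nil =>
              intro acc dp' hg
              exact ⟨by simp, hg⟩
            | cons dgt ds ihd =>
              intro acc dp' hg
              simp only [List.foldl_cons, List.map_cons, List.sum_cons]
              by_cases hcn : ((if dgt = d then count + 1 else count : Nat) : Int) ≤ k
              · rw [if_pos hcn]
                obtain ⟨ha, hb⟩ := ih (pos + 1) (if dgt = d then count + 1 else count)
                  (if f = 0 ∧ dgt < (if f = 0 then pvCharInt (numL.getD pos '0') else 9) then 1 else f)
                  dp' (by omega) (by omega) hg
                obtain ⟨hc, hd2⟩ := ihd _ _ hb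
                refine ⟨?_, hd2⟩
                rw [hc, ha, if_pos hcn]
                ring
              · rw [if_neg hcn]
                obtain ⟨hc, hd2⟩ := ihd acc dp' hg
                refine ⟨?_, hd2⟩
                rw [hc, if_neg hcn]
                ring
          have hG : pvG numL d k (numL.length - pos) count f
              = ((PySem.List.pyRange 0 ((if f = 0 then pvCharInt (numL.getD pos '0') else 9) + 1) 1).map
                  (fun dgt =>
                    if ((if dgt = d then count + 1 else count : Nat) : Int) ≤ k then
                      pvG numL d k (numL.length - (pos + 1)) (if dgt = d then count + 1 else count)
                        (if f = 0 ∧ dgt < (if f = 0 then pvCharInt (numL.getD pos '0') else 9) then 1 else f)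
                    else 0)).sum := by
            rw [show numL.length - pos = (numL.length - (pos + 1)) + 1 by omega]
            simp only [pvG]
            rw [if_neg hck,
              show numL.length - (numL.length - (pos + 1) + 1) = pos by omega,
              PySem.List.foldl_add]
            ring
          obtain ⟨h1, h2⟩ := loop
            (PySem.List.pyRange 0 ((if f = 0 then pvCharInt (numL.getD pos '0') else 9) + 1) 1) 0 dp hgood
          rw [hunf]
          simp only
          constructor
          · rw [h1, hG]
            ring
          · have hval : ((PySem.List.pyRange 0 ((if f = 0 then pvCharInt (numL.getD pos '0') else 9) + 1) 1).foldl
                (fun (st : Int × List (List (List Int))) dgt =>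
                  if ((if dgt = d then count + 1 else count : Nat) : Int) ≤ k then
                    (st.1 + (pvHelperA numL d k fuel (pos + 1) (if dgt = d then count + 1 else count)
                        (if f = 0 ∧ dgt < (if f = 0 then pvCharInt (numL.getD pos '0') else 9) then 1 else f) st.2).1,
                      (pvHelperA numL d k fuel (pos + 1) (if dgt = d then count + 1 else count)
                        (if f = 0 ∧ dgt < (if f = 0 then pvCharInt (numL.getD pos '0') else 9) then 1 else f) st.2).2)
                  else st) ((0 : Int), dp)).1 = pvG numL d k (numL.length - pos) count f := by
              rw [h1, hG]
              ring
            rw [hval]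
            exact pvGood_pvSet numL d k _ pos count f h2
        · rw [show pvHelperA numL d k (fuel + 1) pos count f dp
              = (pvLookup dp pos count f, dp) by
            simp only [pvHelperA]; rw [if_neg hck, if_neg hpe, if_pos hmemo]]
          rcases hgood pos count f with h | h
          · exact absurd h hmemo
          · exact ⟨h, hgood⟩

lemma pvStepB_spec (numL : List Char) (d k : Int) (hk : 0 ≤ k) (pos : Nat)
    (hpos : pos < numL.length) (nxt : List (List Int))
    (h : ∀ (i fn : Nat), (i : Int) < k + 1 → fn < 2 →
      (nxt.getD i []).getD fn 0 = pvG numL d k (numL.length - (pos + 1)) i fn) :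
    ∀ (i fn : Nat), (i : Int) < k + 1 → fn < 2 →
      ((pvStepB numL d k nxt pos).getD i []).getD fn 0
        = pvG numL d k (numL.length - pos) i fn := by
  intro i fn hi hfn
  have hcell : ∀ f0 : Nat, f0 < 2 →
      pvCellB numL d k nxt pos (i : Int) f0 = pvG numL d k (numL.length - pos) i f0 := by
    intro f0 hf0
    have hrem : numL.length - pos = (numL.length - (pos + 1)) + 1 := by omega
    rw [hrem]
    simp only [pvG]
    rw [if_neg (show ¬ ((i : Int) > k) by omega),
      show numL.length - (numL.length - (pos + 1) + 1) = pos by omega]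
    unfold pvCellB
    apply PySem.List.foldl_congr_mem
    intro acc dgt _
    have hfn2 : ∀ dgt : Int,
        (if f0 = 0 ∧ dgt < (if f0 = 0 then pvCharInt (numL.getD pos '0') else 9) then 1 else f0) < 2 := by
      intro dgt
      by_cases hc : f0 = 0 ∧ dgt < (if f0 = 0 then pvCharInt (numL.getD pos '0') else 9)
      · rw [if_pos hc]; omega
      · rw [if_neg hc]; omega
    simp only
    by_cases hd : dgt = d
    · simp only [hd, ite_true]
      by_cases hcn : (i : Int) + 1 ≤ k
      · rw [if_pos hcn, if_pos (show ((i + 1 : Nat) : Int) ≤ k by push_cast; omega),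
          show ((i : Int) + 1).toNat = i + 1 by omega,
          h (i + 1) _ (by push_cast; omega) (hfn2 d)]
      · rw [if_neg hcn, if_neg (show ¬ ((i + 1 : Nat) : Int) ≤ k by push_cast; omega), add_zero]
    · simp only [hd, ite_false, add_zero]
      rw [if_pos (show (i : Int) ≤ k by omega), if_pos (show (i : Int) ≤ k by omega),
        show ((i : Int)).toNat = i by omega,
        h i _ (by omega) (hfn2 dgt)]
  unfold pvStepB
  rw [pv_getD_map_pyRange0 _ _ _ _ (show i < (k + 1).toNat by omega)]
  show ([pvCellB numL d k nxt pos (i : Int) 0, pvCellB numL d k nxt pos (i : Int) 1].getD fn 0) = _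
  rcases fn with _ | _ | fn
  · rw [List.getD_cons_zero]
    exact hcell 0 (by omega)
  · rw [List.getD_cons_succ, List.getD_cons_zero]
    exact hcell 1 (by omega)
  · omega

lemma pvFoldB (numL : List Char) (d k : Int) (hk : 0 ≤ k) :
    ∀ p, p ≤ numL.length → ∀ t,
      (∀ (i fn : Nat), (i : Int) < k + 1 → fn < 2 →
        (t.getD i []).getD fn 0 = pvG numL d k (numL.length - p) i fn) →
      ∀ (i fn : Nat), (i : Int) < k + 1 → fn < 2 →
        ((((List.range p).reverse).foldl (fun cur pos => pvStepB numL d k cur pos) t).getD i []).getD fn 0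
          = pvG numL d k numL.length i fn := by
  intro p
  induction p with
  | zero =>
    intro _ t ht i fn hi hfn
    simpa using ht i fn hi hfn
  | succ q ihq =>
    intro hq t ht i fn hi hfn
    rw [List.range_succ, List.reverse_append, List.reverse_singleton, List.singleton_append,
      List.foldl_cons]
    exact ihq (by omega) (pvStepB numL d k t q)
      (pvStepB_spec numL d k hk q (by omega) t ht) i fn hi hfn

lemma pvG_small (numL : List Char) (d k : Int) :
    ∀ (rem c f : Nat), (c : Int) + (rem : Int) < k → pvG numL d k rem c f = 0 := by
  intro rem
  induction rem with
  | zero => intro c f h; simp only [pvG]; rw [if_neg (by omega)]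
  | succ rem ihr =>
    intro c f h
    simp only [pvG]
    rw [if_neg (by omega), PySem.List.foldl_add]
    have hz : ((PySem.List.pyRange 0
        ((if f = 0 then pvCharInt (numL.getD (numL.length - (rem + 1)) '0') else 9) + 1) 1).map
        (fun dgt =>
          if ((if dgt = d then c + 1 else c : Nat) : Int) ≤ k then
            pvG numL d k rem (if dgt = d then c + 1 else c)
              (if f = 0 ∧ dgt < (if f = 0 then pvCharInt (numL.getD (numL.length - (rem + 1)) '0') else 9)
               then 1 else f)
          else 0)).sum = 0 := by
      apply List.sum_eq_zero
      intro x hx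
      obtain ⟨dgt, -, rfl⟩ := List.mem_map.1 hx
      split <;> split <;>
        first
          | rfl
          | exact ihr _ _ (by push_cast; omega)
    rw [hz]
    ring

-- ===== VERDICT (by name: the statement is the Claim_ definition above) =====
theorem digit_dp_spec : Claim_equal_digit_dp := by
  intro n d k _ _
  unfold Spec_digit_dp
  by_cases hk : k < 0
  · have hA : digit_dp n d k = 0 := by
      simp only [digit_dp, pvHelperA, Nat.cast_zero]
      rw [if_pos (show (0 : Int) > k by omega)]
    have hB : digit_dp_alt n d k = 0 := by
      simp only [digit_dp_alt]
      rw [if_pos (Or.inl hk)]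
    rw [hA, hB]
  · have hk' : 0 ≤ k := by omega
    have hGoodInit : pvGood ((PySem.Int.toStr n).toList) d k
        ((PySem.List.pyRange 0 (((PySem.Int.toStr n).toList).length : Int) 1).map
          (fun _ => (PySem.List.pyRange 0 (k + 1) 1).map (fun _ => [(-1 : Int), -1]))) :=
      fun p c f => Or.inl (pvLookup_init _ _ _ _ _)
    obtain ⟨hA, _⟩ := pvHelperA_spec ((PySem.Int.toStr n).toList) d k
      (((PySem.Int.toStr n).toList).length + 1) 0 0 0 _ (by omega) (by omega) hGoodInit
    have hA' : digit_dp n d k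
        = pvG ((PySem.Int.toStr n).toList) d k (((PySem.Int.toStr n).toList).length) 0 0 := by
      simp only [digit_dp]
      rw [hA, Nat.sub_zero]
    by_cases hkL : k > (((PySem.Int.toStr n).toList).length : Int)
    · have hB : digit_dp_alt n d k = 0 := by
        simp only [digit_dp_alt]
        rw [if_pos (Or.inr hkL)]
      rw [hA', hB]
      exact pvG_small ((PySem.Int.toStr n).toList) d k (((PySem.Int.toStr n).toList).length) 0 0 (by push_cast; omega)
    have hbase : ∀ (i fn : Nat), (i : Int) < k + 1 → fn < 2 →
        (((PySem.List.pyRange 0 (k + 1) 1).map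
          (fun c => [if c = k then (1 : Int) else 0, if c = k then (1 : Int) else 0])).getD i []).getD fn 0
          = pvG ((PySem.Int.toStr n).toList) d k
              (((PySem.Int.toStr n).toList).length - ((PySem.Int.toStr n).toList).length) i fn := by
      intro i fn hi hfn
      rw [Nat.sub_self, pv_getD_map_pyRange0 _ _ _ _ (show i < (k + 1).toNat by omega)]
      rcases fn with _ | _ | fn
      · rw [List.getD_cons_zero]
        simp [pvG]
      · rw [List.getD_cons_succ, List.getD_cons_zero]
        simp [pvG]
      · omega
    have hfold := pvFoldB ((PySem.Int.toStr n).toList) d k hk'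
      (((PySem.Int.toStr n).toList).length) le_rfl _ hbase 0 0 (by omega) (by omega)
    have hB' : digit_dp_alt n d k
        = pvG ((PySem.Int.toStr n).toList) d k (((PySem.Int.toStr n).toList).length) 0 0 := by
      simp only [digit_dp_alt]
      rw [if_neg (by push_neg; omega : ¬(k < 0 ∨ k > (((PySem.Int.toStr n).toList).length : Int)))]
      exact hfold
    rw [hA', hB']
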